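-- pv_equiv track=rewrite | github.com/UCL/TLOmodel | src/scripts/lcoa_inputs_from_tlo_analyses/fig_utils.py | _get_sorted_period_labels_and_display_labels
-- ===== SOURCE A (Python) =====
-- def _parse_period_label(period_label: str) -> tuple[int, int]:
--     """Parse a period label of the form YYYY-YYYY into start/end years."""
--     start_year_text, end_year_text = str(period_label).split("-", maxsplit=1)
--     return int(start_year_text), int(end_year_text)
--
-- def _get_sorted_period_labels_and_display_labels(period_labels: list[str]) -> tuple[list[str], list[str]]:
--     """Return chronological labels plus display labels, falling back to input order if parsing fails."""
--     try:
--         parsed_periods = [(label, _parse_period_label(label)) for label in period_labels]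
--     except (TypeError, ValueError):
--         return period_labels, period_labels
--
--     ordered_period_labels = [
--         label for label, _ in sorted(parsed_periods, key=lambda item: (item[1][0], item[1][1]))
--     ]
--     display_labels = [
--         str(start_year) if start_year == end_year else label
--         for label, (start_year, end_year) in sorted(parsed_periods, key=lambda item: (item[1][0], item[1][1]))
--     ]
--     return ordered_period_labels, display_labels
-- ===== SOURCE B (Python) =====
-- def _get_sorted_period_labels_and_display_labels(period_labels):
--     # Online insertion sort: one pass that parses each label, computes its display
--     # form immediately, and splices the triple into an always-sorted list.
--     ordered = []  # triples ((start, end), label, display), kept key-sorted at all times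
--     for label in period_labels:
--         parts = str(label).split("-", 1)
--         if len(parts) != 2:
--             return period_labels, period_labels
--         try:
--             key = (int(parts[0]), int(parts[1]))
--         except ValueError:
--             return period_labels, period_labels
--         display = str(key[0]) if key[0] == key[1] else label
--         i = 0
--         while i < len(ordered) and ordered[i][0] <= key:
--             i += 1
--         ordered.insert(i, (key, label, display))
--     return [t[1] for t in ordered], [t[2] for t in ordered]
-- ===== Notes on version B (the rewrite author's own statement) =====
-- stated objective: alternative
-- what changed: Drops the try/except comprehension and both sorted() calls: B is an online insertion sort that, in a single pass, parses each label, computes its display string immediately, and splices the ((start,end), label, display) triple into an always-sorted list; it trades the library merge sort's O(n log n) for O(n^2) insertions but one pass and no sort call.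
import Mathlib
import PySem

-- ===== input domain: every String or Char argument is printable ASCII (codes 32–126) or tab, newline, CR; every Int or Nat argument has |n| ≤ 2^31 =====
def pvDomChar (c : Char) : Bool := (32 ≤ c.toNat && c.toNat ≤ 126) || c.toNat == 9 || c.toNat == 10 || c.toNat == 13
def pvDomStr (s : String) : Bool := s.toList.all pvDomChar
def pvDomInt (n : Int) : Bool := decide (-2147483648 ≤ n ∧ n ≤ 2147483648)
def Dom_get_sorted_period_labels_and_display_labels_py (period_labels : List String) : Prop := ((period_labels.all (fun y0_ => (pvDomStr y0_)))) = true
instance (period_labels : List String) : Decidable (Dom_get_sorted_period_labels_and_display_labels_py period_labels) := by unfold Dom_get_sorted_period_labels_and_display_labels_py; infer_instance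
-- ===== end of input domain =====

-- B replaces A's parse-everything-then-sort-twice by an online insertion sort: one pass that
-- parses each label, computes its display form at once, and splices the triple into an
-- always-sorted list; same return value (objective: alternative).

-- ===== PORT A =====
-- A's _parse_period_label, made Option-valued: none exactly where the Python raises ValueError
-- (split("-", 1) yields fewer than 2 pieces, or int() fails)
def pvParsePeriod? (label : String) : Option (Int × Int) :=
  match PySem.Str.splitMax? label "-" 1 with
  | some [a, b] =>
    match PySem.Int.ofStr? a, PySem.Int.ofStr? b with
    | some x, some y => some (x, y)
    | _, _ => none
  | _ => none

-- the list comprehension inside A's try: first failing label aborts the whole list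
def pvParseAllA? : List String → Option (List (String × (Int × Int)))
  | [] => some []
  | l :: ls =>
    match pvParsePeriod? l with
    | none => none
    | some p =>
      match pvParseAllA? ls with
      | none => none
      | some rest => some ((l, p) :: rest)

def get_sorted_period_labels_and_display_labels_py (period_labels : List String) : List String × List String :=
  match pvParseAllA? period_labels with
  | none => (period_labels, period_labels)
  | some parsed_periods =>
    let ordered_period_labels :=
      (PySem.List.sorted2 parsed_periods (fun it => it.2.1) (fun it => it.2.2)).map (fun it => it.1)
    let display_labels :=
      (PySem.List.sorted2 parsed_periods (fun it => it.2.1) (fun it => it.2.2)).map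
        (fun it => if it.2.1 = it.2.2 then PySem.Int.toStr it.2.1 else it.1)
    (ordered_period_labels, display_labels)

-- ===== PORT B =====
-- B's while/insert: walk past triples whose key ≤ the new key (Python tuple <=, exact for
-- Int pairs), splice the new triple before the first strictly greater one
def pvInsB (x : (Int × Int) × String × String) :
    List ((Int × Int) × String × String) → List ((Int × Int) × String × String)
  | [] => [x]
  | y :: ys =>
    if y.1.1 < x.1.1 ∨ (y.1.1 = x.1.1 ∧ y.1.2 ≤ x.1.2) then y :: pvInsB x ys
    else x :: y :: ys

-- B's single for-loop: split, length check, int conversions, display, sorted insertion;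
-- none = the early `return period_labels, period_labels` fallback
def pvLoopB : List String → List ((Int × Int) × String × String) →
    Option (List ((Int × Int) × String × String))
  | [], acc => some acc
  | l :: ls, acc =>
    match PySem.Str.splitMax? l "-" 1 with
    | some [a, b] =>
      match PySem.Int.ofStr? a, PySem.Int.ofStr? b with
      | some s, some e =>
        pvLoopB ls (pvInsB ((s, e), l, if s = e then PySem.Int.toStr s else l) acc)
      | _, _ => none
    | _ => none

def get_sorted_period_labels_and_display_labels_py_alt (period_labels : List String) : List String × List String :=
  match pvLoopB period_labels [] with
  | none => (period_labels, period_labels)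
  | some ordered => (ordered.map (fun t => t.2.1), ordered.map (fun t => t.2.2))

-- ===== PRECONDITION & SPEC =====
def Spec_get_sorted_period_labels_and_display_labels_py (period_labels : List String) (out : List String × List String) : Prop := out = get_sorted_period_labels_and_display_labels_py_alt period_labels
instance (period_labels : List String) (out : List String × List String) : Decidable (Spec_get_sorted_period_labels_and_display_labels_py period_labels out) := by unfold Spec_get_sorted_period_labels_and_display_labels_py; infer_instance

-- ===== CLAIM =====
def Claim_equal_get_sorted_period_labels_and_display_labels_py : Prop := ∀ (period_labels : List String), Dom_get_sorted_period_labels_and_display_labels_py period_labels → Spec_get_sorted_period_labels_and_display_labels_py period_labels (get_sorted_period_labels_and_display_labels_py period_labels)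

-- ===== LEMMAS AND PROOFS =====

-- the triple B keeps, as a function of A's parsed pair
def pvTriple (p : String × (Int × Int)) : (Int × Int) × String × String :=
  (p.2, p.1, if p.2.1 = p.2.2 then PySem.Int.toStr p.2.1 else p.1)

-- sorted2's lexicographic strict-lt comparator, specialised to A's keys
def pvLt (p q : String × (Int × Int)) : Bool :=
  decide (p.2.1 < q.2.1) || (!decide (q.2.1 < p.2.1) && decide (p.2.2 < q.2.2))

lemma pvInsB_eq (x : String × (Int × Int)) (ys : List (String × (Int × Int))) :
    pvInsB (pvTriple x) (ys.map pvTriple) =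
      (PySem.List.insertBy pvLt x ys).map pvTriple := by
  induction ys with
  | nil => simp [pvInsB, PySem.List.insertBy]
  | cons y ys ih =>
    simp only [List.map_cons, pvInsB, PySem.List.insertBy]
    by_cases h : y.2.1 < x.2.1 ∨ (y.2.1 = x.2.1 ∧ y.2.2 ≤ x.2.2)
    · have hlt : pvLt x y = false := by simp [pvLt]; omega
      simp only [pvTriple] at ih ⊢
      simp [h, hlt, ih, pvTriple]
    · have hlt : pvLt x y = true := by simp [pvLt]; omega
      simp [pvTriple, h, hlt]

lemma pvLoopB_eq (ls : List String) (acc : List (String × (Int × Int))) :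
    pvLoopB ls (acc.map pvTriple) =
      (pvParseAllA? ls).map
        (fun ps => ((ps.foldl (fun a x => PySem.List.insertBy pvLt x a) acc).map pvTriple)) := by
  induction ls generalizing acc with
  | nil => simp [pvLoopB, pvParseAllA?]
  | cons l ls ih =>
    simp only [pvLoopB, pvParseAllA?, pvParsePeriod?]
    cases hsp : PySem.Str.splitMax? l "-" 1 with
    | none => rfl
    | some parts =>
      rcases parts with _ | ⟨a, _ | ⟨b, _ | _⟩⟩
      · rfl
      · rfl
      case cons.cons.nil =>
        cases ha : PySem.Int.ofStr? a with
        | none => simp only [ha]; rfl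
        | some s =>
          cases hb : PySem.Int.ofStr? b with
          | none => simp only [ha, hb]; rfl
          | some e =>
            simp only [ha, hb]
            have hins : pvInsB ((s, e), l, if s = e then PySem.Int.toStr s else l)
                (acc.map pvTriple) =
                ((PySem.List.insertBy pvLt (l, (s, e)) acc).map pvTriple) := by
              have h0 := pvInsB_eq (l, (s, e)) acc
              simpa [pvTriple] using h0
            rw [hins, ih]
            cases pvParseAllA? ls <;> simp
      · rfl

lemma sorted2_eq_foldl (ps : List (String × (Int × Int))) :
    PySem.List.sorted2 ps (fun it => it.2.1) (fun it => it.2.2) =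
      ps.foldl (fun a x => PySem.List.insertBy pvLt x a) [] := by
  simp only [PySem.List.sorted2]
  rfl

-- ===== VERDICT =====
theorem get_sorted_period_labels_and_display_labels_py_spec : Claim_equal_get_sorted_period_labels_and_display_labels_py := by
  intro period_labels _
  unfold Spec_get_sorted_period_labels_and_display_labels_py
  unfold get_sorted_period_labels_and_display_labels_py get_sorted_period_labels_and_display_labels_py_alt
  have h := pvLoopB_eq period_labels []
  simp only [List.map_nil] at h
  rw [h]
  cases pvParseAllA? period_labels with
  | none => rfl
  | some parsed =>
    simp only [Option.map_some]
    rw [sorted2_eq_foldl]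
    simp [List.map_map, pvTriple, Function.comp]
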